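-- pv_equiv track=rewrite | github.com/DigitalEuan/ubp_july_2025 | 02/ubp_constants_handbook_tester.py | generate_test_sequence
-- ===== SOURCE A (Python) =====
-- from typing import List, Tuple, Dict, Any
--
-- def generate_test_sequence(n_terms: int, sequence_type: str = 'fibonacci') -> List[int]:
--     """Generate test sequence for constant analysis"""
--     if sequence_type == 'fibonacci':
--         if n_terms <= 0:
--             return []
--         elif n_terms == 1:
--             return [0]
--         elif n_terms == 2:
--             return [0, 1]
--
--         sequence = [0, 1]
--         for i in range(2, n_terms):
--             sequence.append(sequence[i-1] + sequence[i-2])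
--         return sequence
--
--     elif sequence_type == 'natural':
--         return list(range(1, n_terms + 1))
--
--     elif sequence_type == 'squares':
--         return [i*i for i in range(1, n_terms + 1)]
--
--     else:
--         return list(range(1, n_terms + 1))
-- ===== SOURCE B (Python) =====
-- from typing import List
--
-- def _fib(n: int) -> int:
--     """Fast-doubling Fibonacci: returns F(n) in O(log n) multiplications."""
--     def fd(k):
--         if k == 0:
--             return (0, 1)
--         a, b = fd(k >> 1)
--         c = a * (2 * b - a)
--         d = a * a + b * b
--         return (d, c + d) if k & 1 else (c, d)
--     return fd(n)[0]
--
-- def generate_test_sequence(n_terms: int, sequence_type: str = 'fibonacci') -> List[int]: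
--     """Generate test sequence for constant analysis"""
--     if sequence_type == 'fibonacci':
--         return [_fib(i) for i in range(n_terms)]
--     if sequence_type == 'squares':
--         # square as a prefix sum of odd numbers: 1+3+...+(2i-1) = i*i
--         total = 0
--         out = []
--         for i in range(1, n_terms + 1):
--             total += 2 * i - 1
--             out.append(total)
--         return out
--     # 'natural' and any unknown type both yield 1..n_terms
--     return list(range(1, n_terms + 1))
-- ===== Notes on version B (the rewrite author's own statement) =====
-- stated objective: alternative
-- what changed: Fibonacci terms are computed independently by recursive fast doubling (F(2k)/F(2k+1) identities) instead of extending a list via the linear recurrence; squares are produced as a running prefix sum of odd numbers instead of i*i; the identical 'natural' and default branches are merged.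
import Mathlib
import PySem

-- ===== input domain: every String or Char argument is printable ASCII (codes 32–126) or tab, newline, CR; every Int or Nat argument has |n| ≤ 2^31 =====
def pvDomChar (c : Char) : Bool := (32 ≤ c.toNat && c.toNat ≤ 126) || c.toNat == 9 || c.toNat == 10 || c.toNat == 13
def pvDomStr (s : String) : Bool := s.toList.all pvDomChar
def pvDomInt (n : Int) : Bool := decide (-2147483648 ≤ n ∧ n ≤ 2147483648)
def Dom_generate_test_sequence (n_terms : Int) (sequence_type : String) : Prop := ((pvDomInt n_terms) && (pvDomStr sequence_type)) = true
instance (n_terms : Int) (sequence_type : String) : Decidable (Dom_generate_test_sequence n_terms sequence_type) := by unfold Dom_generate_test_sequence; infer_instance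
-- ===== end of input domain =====

-- B computes each Fibonacci term independently by recursive fast doubling, builds squares as a
-- running prefix sum of odd numbers, and merges the identical 'natural'/default branches;
-- objective: alternative (structurally different, similar cost).


-- ===== PORT A =====
-- sequence[i-1] / sequence[i-2]: indices are always in range in A, so pyGetD's default 0 is never used
def generate_test_sequence (n_terms : Int) (sequence_type : String) : List Int :=
  if sequence_type == "fibonacci" then
    if n_terms ≤ 0 then []
    else if n_terms == 1 then [0]
    else if n_terms == 2 then [0, 1]
    else
      (PySem.List.pyRange 2 n_terms 1).foldl
        (fun seq i => seq ++ [PySem.List.pyGetD seq (i - 1) 0 + PySem.List.pyGetD seq (i - 2) 0])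
        [0, 1]
  else if sequence_type == "natural" then PySem.List.pyRange 1 (n_terms + 1) 1
  else if sequence_type == "squares" then (PySem.List.pyRange 1 (n_terms + 1) 1).map (fun i => i * i)
  else PySem.List.pyRange 1 (n_terms + 1) 1

-- ===== PORT B =====
-- fd = Source B's fast-doubling helper: fd k = (F(k), F(k+1)); k >> 1 is k / 2, k & 1 is k % 2
def fd (k : Nat) : Int × Int :=
  if h : k = 0 then (0, 1)
  else
    let p := fd (k / 2)
    let a := p.1
    let b := p.2
    let c := a * (2 * b - a)
    let d := a * a + b * b
    if k % 2 = 1 then (d, c + d) else (c, d)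
decreasing_by exact Nat.div_lt_self (Nat.pos_of_ne_zero h) (by norm_num)

def generate_test_sequence_alt (n_terms : Int) (sequence_type : String) : List Int :=
  if sequence_type == "fibonacci" then
    -- [_fib(i) for i in range(n_terms)]; every i in the range is ≥ 0, so i.toNat is exact
    (PySem.List.pyRange 0 n_terms 1).map (fun i => (fd i.toNat).1)
  else if sequence_type == "squares" then
    -- total/out loop: total += 2*i - 1; out.append(total)
    ((PySem.List.pyRange 1 (n_terms + 1) 1).foldl
      (fun st i => (st.1 + (2 * i - 1), st.2 ++ [st.1 + (2 * i - 1)])) ((0 : Int), ([] : List Int))).2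
  else PySem.List.pyRange 1 (n_terms + 1) 1

-- ===== PRECONDITION & SPEC =====
def Spec_generate_test_sequence (n_terms : Int) (sequence_type : String) (out : List Int) : Prop := out = generate_test_sequence_alt n_terms sequence_type
instance (n_terms : Int) (sequence_type : String) (out : List Int) : Decidable (Spec_generate_test_sequence n_terms sequence_type out) := by unfold Spec_generate_test_sequence; infer_instance

-- ===== CLAIM =====
def Claim_equal_generate_test_sequence : Prop := ∀ (n_terms : Int) (sequence_type : String), Dom_generate_test_sequence n_terms sequence_type → Spec_generate_test_sequence n_terms sequence_type (generate_test_sequence n_terms sequence_type)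

-- ===== LEMMAS AND PROOFS =====

-- fast doubling computes Fibonacci
lemma fd_spec : ∀ k : Nat, fd k = ((Nat.fib k : Int), (Nat.fib (k + 1) : Int)) := by
  intro k
  induction k using Nat.strong_induction_on with
  | _ k ih =>
    rcases Nat.eq_zero_or_pos k with h0 | hpos
    · subst h0; simp [fd]
    · have hk : k ≠ 0 := Nat.pos_iff_ne_zero.mp hpos
      rw [fd]
      simp only [hk, dif_neg, not_false_eq_true]
      rw [ih (k / 2) (Nat.div_lt_self hpos (by norm_num))]
      set m := k / 2 with hm
      have hfibm : (Nat.fib m : Int) ≤ (Nat.fib (m + 1) : Int) := by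
        exact_mod_cast Nat.fib_le_fib_succ
      have h2m : (Nat.fib (2 * m) : Int) =
          (Nat.fib m : Int) * (2 * (Nat.fib (m + 1) : Int) - (Nat.fib m : Int)) := by
        have := Nat.fib_two_mul m
        have hle : Nat.fib m ≤ 2 * Nat.fib (m + 1) := by
          calc Nat.fib m ≤ Nat.fib (m + 1) := Nat.fib_le_fib_succ
            _ ≤ 2 * Nat.fib (m + 1) := by omega
        push_cast [this, Nat.sub_add_cancel, Int.ofNat_sub hle]
        ring
      have h2m1 : (Nat.fib (2 * m + 1) : Int) =
          (Nat.fib m : Int) * (Nat.fib m : Int) + (Nat.fib (m + 1) : Int) * (Nat.fib (m + 1) : Int) := by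
        have := Nat.fib_two_mul_add_one m
        push_cast [this]; ring
      by_cases hodd : k % 2 = 1
      · have hkeq : k = 2 * m + 1 := by omega
        simp only [hodd, if_pos, Prod.mk.injEq]
        refine ⟨?_, ?_⟩
        · rw [hkeq]; rw [h2m1]
        · have : Nat.fib (k + 1) = Nat.fib (2 * m) + Nat.fib (2 * m + 1) := by
            rw [hkeq]; rw [show 2 * m + 1 + 1 = (2 * m) + 2 by ring, Nat.fib_add_two]
          rw [this]; push_cast; rw [h2m, h2m1]
      · have hkeq : k = 2 * m := by omega
        simp only [hodd, if_neg, not_false_eq_true, Prod.mk.injEq]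
        refine ⟨?_, ?_⟩
        · rw [hkeq, h2m]
        · have : (2 : Nat) * m + 1 = k + 1 := by omega
          rw [← this, h2m1]

def pvFibList (n : Nat) : List Int := (List.range n).map (fun j => (Nat.fib j : Int))

lemma pvFibList_get (n j : Nat) (hj : j < n) (d : Int) :
    PySem.List.pyGetD (pvFibList n) (j : Int) d = (Nat.fib j : Int) := by
  rw [PySem.List.pyGetD_natCast]
  simp [pvFibList, List.getD, hj]

lemma aFold_eq (m : Nat) (hm : 2 ≤ m) :
    (PySem.List.pyRange 2 (m : Int) 1).foldl
        (fun seq i => seq ++ [PySem.List.pyGetD seq (i - 1) 0 + PySem.List.pyGetD seq (i - 2) 0])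
        [0, 1] = pvFibList m := by
  induction m with
  | zero => omega
  | succ k ih =>
    rcases Nat.lt_or_ge k 2 with hk | hk
    · interval_cases k
      · omega
      · rw [show ((2:Nat):Int) = 2 by norm_num, PySem.List.pyRange_one_eq_nil (by norm_num)]
        simp [pvFibList, List.range_succ]
    · have hrange : PySem.List.pyRange 2 ((k + 1 : Nat) : Int) 1
          = PySem.List.pyRange 2 (k : Int) 1 ++ [(k : Int)] := by
        have : ((k + 1 : Nat) : Int) = (k : Int) + 1 := by push_cast; ring
        rw [this, PySem.List.pyRange_one_succ_right (by exact_mod_cast hk)]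
      rw [hrange, List.foldl_append, ih hk]
      simp only [List.foldl_cons, List.foldl_nil]
      have h1 : ((k : Int) - 1) = ((k - 1 : Nat) : Int) := by push_cast [Nat.cast_sub (by omega : 1 ≤ k)]; ring
      have h2 : ((k : Int) - 2) = ((k - 2 : Nat) : Int) := by push_cast [Nat.cast_sub (by omega : 2 ≤ k)]; ring
      rw [h1, h2, pvFibList_get k (k - 1) (by omega), pvFibList_get k (k - 2) (by omega)]
      have hfib : (Nat.fib (k - 1) : Int) + (Nat.fib (k - 2) : Int) = (Nat.fib k : Int) := by
        have : Nat.fib (k - 2) + Nat.fib (k - 2 + 1) = Nat.fib (k - 2 + 2) := (Nat.fib_add_two).symm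
        have hk1 : k - 2 + 1 = k - 1 := by omega
        have hk2 : k - 2 + 2 = k := by omega
        rw [hk1, hk2] at this
        push_cast [← this]; ring
      rw [hfib]
      simp [pvFibList, List.range_succ]

-- B's fibonacci comprehension also equals pvFibList
lemma bFib_eq (n : Int) :
    (PySem.List.pyRange 0 n 1).map (fun i => (fd i.toNat).1) = pvFibList n.toNat := by
  rw [PySem.List.pyRange_one]
  simp only [List.map_map, pvFibList]
  have : (n - 0).toNat = n.toNat := by omega
  rw [this]
  apply List.map_congr_left
  intro k hk
  simp only [Function.comp]
  rw [show ((0 : Int) + (k : Int)).toNat = k by omega, fd_spec]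

-- A's fibonacci branch equals pvFibList
lemma fib_branch_eq (n : Int) :
    (if n ≤ 0 then []
     else if n == 1 then [0]
     else if n == 2 then ([0, 1] : List Int)
     else (PySem.List.pyRange 2 n 1).foldl
        (fun seq i => seq ++ [PySem.List.pyGetD seq (i - 1) 0 + PySem.List.pyGetD seq (i - 2) 0])
        [0, 1]) = pvFibList n.toNat := by
  split_ifs with h0 h1 h2
  · have : n.toNat = 0 := by omega
    simp [this, pvFibList]
  · have h1' : n = 1 := by simpa using h1
    subst h1'
    simp [pvFibList, List.range_succ]
  · have h2' : n = 2 := by simpa using h2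
    subst h2'
    simp [pvFibList, List.range_succ]
  · have h1' : n ≠ 1 := by simpa using h1
    have h2' : n ≠ 2 := by simpa using h2
    have hm : 2 ≤ n.toNat := by omega
    have hcast : ((n.toNat : Int)) = n := by omega
    rw [← hcast]
    exact aFold_eq n.toNat hm

-- B's squares loop: after m iterations, total = m² and out is the list of squares
lemma sq_loop (m : Nat) :
    (PySem.List.pyRange 1 ((m : Int) + 1) 1).foldl
      (fun st i => (st.1 + (2 * i - 1), st.2 ++ [st.1 + (2 * i - 1)])) ((0 : Int), ([] : List Int))
    = ((m : Int) * m, (PySem.List.pyRange 1 ((m : Int) + 1) 1).map (fun i => i * i)) := by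
  induction m with
  | zero =>
    rw [PySem.List.pyRange_one_eq_nil (by norm_num)]
    simp
  | succ k ih =>
    have hr : PySem.List.pyRange 1 (((k + 1 : Nat) : Int) + 1) 1
        = PySem.List.pyRange 1 ((k : Int) + 1) 1 ++ [(k : Int) + 1] := by
      have : (((k + 1 : Nat) : Int) + 1) = ((k : Int) + 1) + 1 := by push_cast; ring
      rw [this, PySem.List.pyRange_one_succ_right (by omega)]
    rw [hr, List.foldl_append, ih, List.map_append]
    simp only [List.foldl_cons, List.foldl_nil, List.map_cons, List.map_nil, Prod.mk.injEq]
    refine ⟨?_, ?_⟩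
    · push_cast
      ring
    · congr 1
      ring_nf

lemma sq_branch_eq (n : Int) :
    ((PySem.List.pyRange 1 (n + 1) 1).foldl
      (fun st i => (st.1 + (2 * i - 1), st.2 ++ [st.1 + (2 * i - 1)])) ((0 : Int), ([] : List Int))).2
    = (PySem.List.pyRange 1 (n + 1) 1).map (fun i => i * i) := by
  by_cases h : n ≤ 0
  · rw [PySem.List.pyRange_one_eq_nil (by omega)]
    simp
  · have hcast : ((n.toNat : Int)) = n := by omega
    rw [← hcast, sq_loop]

-- ===== VERDICT =====
theorem generate_test_sequence_spec : Claim_equal_generate_test_sequence := by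
  intro n s _
  unfold Spec_generate_test_sequence generate_test_sequence generate_test_sequence_alt
  by_cases hf : s == "fibonacci"
  · simp only [hf, if_pos]
    rw [fib_branch_eq, bFib_eq]
  · by_cases hn : s == "natural"
    · have : ¬ (s == "squares") = true := by
        have := of_decide_eq_true hn; subst this; decide
      simp only [hf, hn, this, if_neg, if_pos, Bool.false_eq_true, not_false_eq_true]
    · by_cases hs : s == "squares"
      · simp only [hf, hn, hs, if_neg, if_pos, Bool.false_eq_true, not_false_eq_true]
        exact (sq_branch_eq n).symm
      · simp only [hf, hn, hs, if_neg, Bool.false_eq_true, not_false_eq_true]
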